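-- pv_equiv track=rewrite | github.com/jjonescz/awe | awe/utils.py | _iterate_ranges
-- ===== SOURCE A (Python) =====
-- import itertools
-- from typing import TYPE_CHECKING, Any, Callable, Iterable, Optional, TypeVar
--
-- T = TypeVar('T')
--
-- def _iterate_ranges(iterable: Iterable[T]):
--     # Inspired by https://stackoverflow.com/a/43091576.
--     iterable = sorted(set(iterable))
--     for _, group in itertools.groupby(
--         enumerate(iterable),
--         lambda t: t[1] - t[0]
--     ):
--         group = list(group)
--         yield group[0][1], group[-1][1]
-- ===== SOURCE B (Python) =====
-- def _iterate_ranges(iterable):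
--     s = set(iterable)
--     start = 0
--     for x in sorted(s):
--         if x - 1 not in s:
--             start = x
--         if x + 1 not in s:
--             yield start, x
-- ===== Notes on version B (the rewrite author's own statement) =====
-- stated objective: alternative
-- what changed: Replaces the groupby-over-enumerate run-grouping (key x-i constant on a run) by neighbor membership tests on the set: x starts a range when x-1 is absent and ends one when x+1 is absent, so no groups are materialized.
import Mathlib
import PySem

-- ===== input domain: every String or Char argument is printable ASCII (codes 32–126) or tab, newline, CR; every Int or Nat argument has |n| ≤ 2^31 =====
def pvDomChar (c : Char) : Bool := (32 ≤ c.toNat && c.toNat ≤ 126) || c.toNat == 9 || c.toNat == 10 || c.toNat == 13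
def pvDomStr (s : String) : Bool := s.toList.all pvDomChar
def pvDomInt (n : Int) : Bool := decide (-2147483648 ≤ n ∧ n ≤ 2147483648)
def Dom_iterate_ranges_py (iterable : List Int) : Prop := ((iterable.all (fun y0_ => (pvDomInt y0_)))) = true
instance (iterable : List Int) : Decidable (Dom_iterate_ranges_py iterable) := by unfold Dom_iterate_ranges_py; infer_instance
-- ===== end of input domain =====

-- B detects range boundaries by set membership of x-1 / x+1 instead of A's groupby over enumerate; return values proved equal.

-- ===== PORT A =====
-- itertools.groupby: pvGroupby collects maximal runs of elements with equal key, in order;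
-- pvGlue prepends an element to the run structure of the rest (its empty-group branch is unreachable).
def pvGlue (key : Int × Int → Int) (a : Int × Int) : List (List (Int × Int)) → List (List (Int × Int))
  | [] => [[a]]
  | [] :: _ => [[a]]
  | (b :: g) :: gs => if key a == key b then (a :: b :: g) :: gs else [a] :: (b :: g) :: gs

def pvGroupby (key : Int × Int → Int) : List (Int × Int) → List (List (Int × Int))
  | [] => []
  | a :: as => pvGlue key a (pvGroupby key as)

def iterate_ranges_py (iterable : List Int) : List (Int × Int) :=
  let l := PySem.List.sorted (PySem.Set.ofList iterable) (fun x => x) false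
  (pvGroupby (fun t => t.2 - t.1) (PySem.List.enumerate l 0)).map
    (fun g => ((g.headD (0, 0)).2, (g.getLastD (0, 0)).2))

-- ===== PORT B =====
def iterate_ranges_py_alt (iterable : List Int) : List (Int × Int) :=
  let s := PySem.Set.ofList iterable
  ((PySem.List.sorted s (fun x => x) false).foldl
    (fun (st : Int × List (Int × Int)) x =>
      let start := if !(PySem.Set.contains s (x - 1)) then x else st.1
      let acc := if !(PySem.Set.contains s (x + 1)) then st.2 ++ [(start, x)] else st.2
      (start, acc)) (0, [])).2

-- ===== PRECONDITION & SPEC =====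
def Spec_iterate_ranges_py (iterable : List Int) (out : List (Int × Int)) : Prop := out = iterate_ranges_py_alt iterable
instance (iterable : List Int) (out : List (Int × Int)) : Decidable (Spec_iterate_ranges_py iterable out) := by unfold Spec_iterate_ranges_py; infer_instance

-- ===== CLAIM (what is proved, stated in full; the proofs are below) =====
def Claim_equal_iterate_ranges_py : Prop := ∀ (iterable : List Int), Dom_iterate_ranges_py iterable → Spec_iterate_ranges_py iterable (iterate_ranges_py iterable)

-- ===== LEMMAS AND PROOFS =====

-- common normal form of both programs: the maximal runs of consecutive integers of a strictly increasing list
def runsAux (start last : Int) : List Int → List (Int × Int)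
  | [] => [(start, last)]
  | y :: ys => if y = last + 1 then runsAux start y ys else (start, last) :: runsAux y y ys

-- B's loop as pure structural recursion; prev = the previous element of the sorted list, if any
def bspec (prev : Option Int) (start : Int) : List Int → List (Int × Int)
  | [] => []
  | x :: v =>
    let s' := if prev = some (x - 1) then start else x
    (if v.head? = some (x + 1) then [] else [(s', x)]) ++ bspec (some x) s' v

-- B's fold step with membership tested against the sorted list itself
def pvStep (l : List Int) (st : Int × List (Int × Int)) (x : Int) : Int × List (Int × Int) :=
  let start := if !(decide ((x - 1) ∈ l)) then x else st.1
  let acc := if !(decide ((x + 1) ∈ l)) then st.2 ++ [(start, x)] else st.2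
  (start, acc)

theorem gb_shape (key : Int × Int → Int) (as : List (Int × Int)) (a : Int × Int) :
    ∃ t gs, pvGroupby key (a :: as) = (a :: t) :: gs := by
  cases h : pvGroupby key as with
  | nil => exact ⟨[], [], by simp [pvGroupby, pvGlue, h]⟩
  | cons g gs =>
    cases g with
    | nil => exact ⟨[], [], by simp [pvGroupby, pvGlue, h]⟩
    | cons b g' =>
      by_cases hk : key a == key b
      · exact ⟨b :: g', gs, by simp [pvGroupby, pvGlue, h, hk]⟩
      · exact ⟨[], (b :: g') :: gs, by simp [pvGroupby, pvGlue, h, hk]⟩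

theorem runsAux_start (ys : List Int) (last : Int) :
    ∃ e rest, ∀ start, runsAux start last ys = (start, e) :: rest := by
  induction ys generalizing last with
  | nil => exact ⟨last, [], fun s => rfl⟩
  | cons y ys ih =>
    by_cases hy : y = last + 1
    · obtain ⟨e, rest, h⟩ := ih y
      exact ⟨e, rest, fun s => by rw [runsAux, if_pos hy, h]⟩
    · exact ⟨last, runsAux y y ys, fun s => by simp [runsAux, hy]⟩

theorem A_core (ys : List Int) (x i : Int) (h : (x :: ys).Pairwise (· < ·)) :
    (pvGroupby (fun t => t.2 - t.1) (PySem.List.enumerate (x :: ys) i)).map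
      (fun g => ((g.headD (0, 0)).2, (g.getLastD (0, 0)).2)) = runsAux x x ys := by
  induction ys generalizing x i with
  | nil => simp [PySem.List.enumerate_cons, PySem.List.enumerate_nil, pvGroupby, pvGlue, runsAux]
  | cons y ys ih =>
    have hxy : x < y := (List.pairwise_cons.mp h).1 y (by simp)
    have h' : (y :: ys).Pairwise (· < ·) := (List.pairwise_cons.mp h).2
    obtain ⟨t, gs, ht⟩ := gb_shape (fun t => t.2 - t.1) (PySem.List.enumerate ys (i + 1 + 1)) (i + 1, y)
    have hih := ih y (i + 1) h'
    rw [PySem.List.enumerate_cons] at hih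
    rw [PySem.List.enumerate_cons, PySem.List.enumerate_cons]
    rw [ht] at hih
    obtain ⟨e, rest, hr⟩ := runsAux_start ys y
    rw [hr y] at hih
    simp only [List.map_cons] at hih
    obtain ⟨hf, hgs⟩ := List.cons.injEq .. ▸ hih
    rw [show pvGroupby (fun t => t.2 - t.1) ((i, x) :: (i + 1, y) :: PySem.List.enumerate ys (i + 1 + 1)) = pvGlue (fun t => t.2 - t.1) (i, x) (pvGroupby (fun t => t.2 - t.1) ((i + 1, y) :: PySem.List.enumerate ys (i + 1 + 1))) from rfl, ht]
    simp only [pvGlue]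
    by_cases hy : y = x + 1
    · rw [if_pos (show ((fun t : Int × Int => t.2 - t.1) (i, x) == (fun t : Int × Int => t.2 - t.1) (i + 1, y)) = true by simp; omega)]
      simp only [List.map_cons]
      rw [runsAux, if_pos hy, hr x]
      refine congrArg₂ _ ?_ hgs
      simp only [List.headD_cons, List.getLastD_cons] at hf ⊢
      simp only [Prod.ext_iff] at hf ⊢
      exact hf
    · rw [if_neg (show ¬ ((fun t : Int × Int => t.2 - t.1) (i, x) == (fun t : Int × Int => t.2 - t.1) (i + 1, y)) = true by simp; omega)]
      simp only [List.map_cons]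
      rw [runsAux, if_neg hy]
      refine congrArg₂ _ rfl ?_
      rw [← hr y] at hih
      exact hih

theorem mem_succ_iff (p v : List Int) (x : Int) (h : (p ++ x :: v).Pairwise (· < ·)) :
    (x + 1) ∈ (p ++ x :: v) ↔ v.head? = some (x + 1) := by
  rw [List.pairwise_append] at h
  obtain ⟨hp, hxv, hcross⟩ := h
  obtain ⟨hxlt, hv⟩ := List.pairwise_cons.mp hxv
  constructor
  · intro hm
    rcases List.mem_append.mp hm with hm | hm
    · exact absurd (hcross _ hm x (by simp)) (by omega)
    · rcases List.mem_cons.mp hm with hm | hm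
      · omega
      · cases v with
        | nil => simp at hm
        | cons h0 t =>
          rcases List.mem_cons.mp hm with rfl | hm
          · rfl
          · have h1 : x < h0 := hxlt h0 (by simp)
            have h2 : h0 < x + 1 := (List.pairwise_cons.mp hv).1 _ hm
            omega
  · intro hh
    cases v with
    | nil => simp at hh
    | cons h0 t =>
      simp only [List.head?_cons, Option.some.injEq] at hh
      exact List.mem_append.mpr (Or.inr (by simp [hh]))

theorem mem_pred_iff (p v : List Int) (x : Int) (h : (p ++ x :: v).Pairwise (· < ·)) :
    (x - 1) ∈ (p ++ x :: v) ↔ p.getLast? = some (x - 1) := by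
  rw [List.pairwise_append] at h
  obtain ⟨hp, hxv, hcross⟩ := h
  have hxle : ∀ b ∈ x :: v, x ≤ b := by
    intro b hb
    rcases List.mem_cons.mp hb with rfl | hb
    · omega
    · exact le_of_lt ((List.pairwise_cons.mp hxv).1 _ hb)
  rcases List.eq_nil_or_concat p with rfl | ⟨q, m, rfl⟩
  all_goals simp only [List.concat_eq_append] at *
  · simp only [List.nil_append, List.getLast?_nil]
    constructor
    · intro hm; have := hxle _ hm; omega
    · intro hm; simp at hm
  · rw [List.getLast?_concat]
    have hmx : m < x := hcross m (by simp) x (by simp)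
    constructor
    · intro hm
      rcases List.mem_append.mp hm with hm | hm
      · rcases List.mem_append.mp hm with hm | hm
        · have h1 : x - 1 < m := by
            have := List.pairwise_append.mp hp
            exact this.2.2 _ hm m (by simp)
          omega
        · simp only [List.mem_singleton] at hm
          rw [hm]
      · have := hxle _ hm; omega
    · intro hm
      obtain rfl : m = x - 1 := by simpa using hm
      exact List.mem_append.mpr (Or.inl (List.mem_append.mpr (Or.inr (by simp))))

theorem pvStep_eq (l p v : List Int) (x : Int) (st : Int × List (Int × Int))
    (h1 : ((x - 1) ∈ l) ↔ p.getLast? = some (x - 1))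
    (h2 : ((x + 1) ∈ l) ↔ v.head? = some (x + 1)) :
    pvStep l st x =
      (if p.getLast? = some (x - 1) then st.1 else x,
       if v.head? = some (x + 1) then st.2
         else st.2 ++ [(if p.getLast? = some (x - 1) then st.1 else x, x)]) := by
  by_cases a1 : p.getLast? = some (x - 1) <;> by_cases a2 : v.head? = some (x + 1) <;>
    simp [pvStep, h1, h2, a1, a2]

theorem bfold (l : List Int) (hl : l.Pairwise (· < ·)) :
    ∀ (u p : List Int), p ++ u = l → ∀ st acc,
      (u.foldl (pvStep l) (st, acc)).2 = acc ++ bspec p.getLast? st u := by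
  intro u
  induction u with
  | nil => intro p hp st acc; simp [bspec]
  | cons x v ih =>
    intro p hp st acc
    have hlp : (p ++ x :: v).Pairwise (· < ·) := by rw [hp]; exact hl
    have hm1 : ((x - 1) ∈ l) ↔ p.getLast? = some (x - 1) := by
      rw [← hp]; exact mem_pred_iff p v x hlp
    have hm2 : ((x + 1) ∈ l) ↔ v.head? = some (x + 1) := by
      rw [← hp]; exact mem_succ_iff p v x hlp
    rw [List.foldl_cons, pvStep_eq l p v x (st, acc) hm1 hm2,
      ih (p ++ [x]) (by simpa using hp), List.getLast?_concat]
    by_cases a1 : p.getLast? = some (x - 1) <;> by_cases a2 : v.head? = some (x + 1) <;>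
      simp [bspec, a1, a2]

theorem bspec_runsAux (v : List Int) (x start : Int) (h : (x :: v).Pairwise (· < ·)) :
    (if v.head? = some (x + 1) then ([] : List (Int × Int)) else [(start, x)]) ++ bspec (some x) start v
      = runsAux start x v := by
  induction v generalizing x start with
  | nil => simp [bspec, runsAux]
  | cons y ys ih =>
    have hxy : x < y := (List.pairwise_cons.mp h).1 y (by simp)
    have h' : (y :: ys).Pairwise (· < ·) := (List.pairwise_cons.mp h).2
    by_cases hy : y = x + 1
    · have hx : some x = some (y - 1) := by subst hy; norm_num
      rw [if_pos (by simp [hy]), List.nil_append, runsAux, if_pos hy, ← ih y start h']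
      simp only [bspec]
      rw [if_pos hx]
    · have hx : ¬ some x = some (y - 1) := by simp; omega
      rw [if_neg (by simp [hy]), runsAux, if_neg hy, ← ih y y h']
      simp only [bspec]
      rw [if_neg hx]
      simp

-- ===== VERDICT (by name: the statement is the Claim_ definition above) =====
theorem iterate_ranges_py_spec : Claim_equal_iterate_ranges_py := by
  intro xs _
  unfold Spec_iterate_ranges_py iterate_ranges_py iterate_ranges_py_alt
  have hl := PySem.List.sorted_ofList_pairwise_lt (xs := xs)
  have e : ∀ a : Int, PySem.Set.contains (PySem.Set.ofList xs) a
      = decide (a ∈ PySem.List.sorted (PySem.Set.ofList xs) (fun x => x) false) := by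
    intro a
    rw [Bool.eq_iff_iff]
    simp [PySem.List.mem_sorted, PySem.Set.mem_ofList]
  have hc : (fun (st : Int × List (Int × Int)) x =>
      let start := if !(PySem.Set.contains (PySem.Set.ofList xs) (x - 1)) then x else st.1
      let acc := if !(PySem.Set.contains (PySem.Set.ofList xs) (x + 1)) then st.2 ++ [(start, x)] else st.2
      (start, acc)) = pvStep (PySem.List.sorted (PySem.Set.ofList xs) (fun x => x) false) := by
    funext st x
    simp only [pvStep, e]
  dsimp only
  rw [hc]
  cases hcase : PySem.List.sorted (PySem.Set.ofList xs) (fun x => x) false with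
  | nil => rfl
  | cons x ys =>
    rw [hcase] at hl
    rw [A_core ys x 0 hl]
    rw [bfold (x :: ys) hl (x :: ys) [] rfl 0 []]
    have h0 : ((none : Option Int) = some (x - 1)) = False := by simp
    simp only [bspec, List.nil_append, List.getLast?_nil, h0, if_false]
    rw [bspec_runsAux ys x x hl]
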